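-- pv_equiv track=rewrite | github.com/GGGGXQ/LanQiaoCode | Enum/sum_day.py | check
-- ===== SOURCE A (Python) =====
-- def check(month, day):
--     if month < 1 or month > 12 or day < 1 or day > 31:
--         return False
--     if month == 2 and day > 28:
--         return False
--     v = [4, 6, 9, 11]
--     for i in v:
--         if month == i and day > 30:
--             return False
--     return True
-- ===== SOURCE B (Python) =====
-- def check(month, day):
--     maxdays = [31, 28, 31, 30, 31, 30, 31, 31, 30, 31, 30, 31]
--     if month < 1 or month > 12:
--         return False
--     return 1 <= day <= maxdays[month - 1]
-- ===== Notes on version B (the rewrite author's own statement) =====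
-- stated objective: idiomatic
-- what changed: Replaced the early-return chain with its separate February branch and the loop over [4,6,9,11] by a fixed days-in-month table indexed by month-1 after a single month-range guard.
import Mathlib
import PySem

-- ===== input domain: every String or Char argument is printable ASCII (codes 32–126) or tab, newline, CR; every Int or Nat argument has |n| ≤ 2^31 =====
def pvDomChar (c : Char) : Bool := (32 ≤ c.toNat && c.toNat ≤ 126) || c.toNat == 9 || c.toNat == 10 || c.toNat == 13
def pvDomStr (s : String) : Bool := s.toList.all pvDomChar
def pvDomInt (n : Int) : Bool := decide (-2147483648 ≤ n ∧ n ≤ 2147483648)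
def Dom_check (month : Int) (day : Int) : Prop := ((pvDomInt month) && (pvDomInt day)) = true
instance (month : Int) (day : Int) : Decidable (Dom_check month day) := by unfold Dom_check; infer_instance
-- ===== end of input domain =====

-- B replaces A's February branch and loop over [4,6,9,11] by a fixed days-in-month table lookup (idiomatic; same exact behaviour).


-- ===== PORT A =====
-- literal transliteration of A: early returns become nested ifs; the for-loop over v is checkLoop
def checkLoop (month : Int) (day : Int) : List Int → Bool
  | [] => true
  | i :: rest => if month = i && day > 30 then false else checkLoop month day rest

def check (month : Int) (day : Int) : Bool :=
  if month < 1 || month > 12 || day < 1 || day > 31 then false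
  else if month = 2 && day > 28 then false
  else checkLoop month day [4, 6, 9, 11]

-- ===== PORT B =====
-- B: days-in-month table; month is in [1,12] at the lookup, so pyGet? is some (getD 0 unreachable)
def check_alt (month : Int) (day : Int) : Bool :=
  let maxdays : List Int := [31, 28, 31, 30, 31, 30, 31, 31, 30, 31, 30, 31]
  if month < 1 || month > 12 then false
  else 1 ≤ day && day ≤ (PySem.List.pyGet? maxdays (month - 1)).getD 0

-- ===== PRECONDITION & SPEC =====
def Spec_check (month : Int) (day : Int) (out : Bool) : Prop := out = check_alt month day
instance (month : Int) (day : Int) (out : Bool) : Decidable (Spec_check month day out) := by unfold Spec_check; infer_instance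

-- ===== CLAIM (what is proved, stated in full; the proofs are below) =====
def Claim_equal_check : Prop := ∀ (month : Int) (day : Int), Dom_check month day → Spec_check month day (check month day)

-- ===== LEMMAS AND PROOFS =====

-- ===== VERDICT (by name: the statement is the Claim_ definition above) =====
theorem check_spec : Claim_equal_check := by
  intro month day _
  unfold Spec_check check check_alt checkLoop
  by_cases h1 : month < 1
  · simp [h1]
  · by_cases h2 : month > 12
    · simp [h1, h2]
    · interval_cases month <;>
        · rw [Bool.eq_iff_iff]
          simp [PySem.List.pyGet?, PySem.List.pyIdx?, checkLoop]
          try omega
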